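-- pv_equiv track=rewrite | github.com/ariane-lozachmeur/advent-of-code | 2020/day24.py | find_tile_index
-- ===== SOURCE A (Python) =====
-- def find_tile_index(line):
--     x = 0
--     y = 0
--     i = 0
--     while i < len(line):
--         direction = line[i]
--         if direction in ['n', 's']:
--             direction += line[i+1]
--             i+=2
--             if direction == 'ne':
--                 y+=-1
--             elif direction == 'nw':
--                 y+=-1
--                 x+=-1
--             elif direction == 'sw':
--                 y+=1
--             elif direction == 'se':
--                 y+=1
--                 x+=1
--         elif direction == 'e':
--             x+=1
--             i+=1
--         elif direction == 'w':
--             x-=1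
--             i+=1
--     return x, y
-- ===== SOURCE B (Python) =====
-- def tokens(line):
--     it = iter(line)
--     return [c + next(it) if c in 'ns' else c for c in it]
--
--
-- def find_tile_index(line):
--     n = tokens(line).count
--     return (n('e') - n('w') + n('se') - n('nw'),
--             n('se') + n('sw') - n('ne') - n('nw'))
-- ===== Notes on version B (the rewrite author's own statement) =====
-- stated objective: alternative
-- what changed: A is a single-pass index-stepping state machine that accumulates x,y branch by branch; B never accumulates coordinates: it splits the line into direction tokens, counts the occurrences of each of the six token types, and returns x,y as a closed-form linear combination of those counts (correct because each token's contribution is fixed and addition is commutative).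
import Mathlib
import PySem

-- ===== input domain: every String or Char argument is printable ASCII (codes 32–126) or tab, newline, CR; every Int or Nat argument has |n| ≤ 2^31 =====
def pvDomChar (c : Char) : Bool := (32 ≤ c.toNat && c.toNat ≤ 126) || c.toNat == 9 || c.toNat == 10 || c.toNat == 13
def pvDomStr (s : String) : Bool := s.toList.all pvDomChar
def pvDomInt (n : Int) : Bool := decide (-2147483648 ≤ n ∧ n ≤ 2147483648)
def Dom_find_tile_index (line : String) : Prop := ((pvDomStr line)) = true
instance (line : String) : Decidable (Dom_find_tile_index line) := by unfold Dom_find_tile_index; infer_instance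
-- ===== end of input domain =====

-- B replaces A's coordinate-accumulating state machine by tokenize, count the six token types, and a closed-form linear combination of the counts (alternative decomposition; same cost).


-- ===== PORT A =====
-- A's while-loop, ported with fuel (line.length + 1 bounds the iteration count on every input
-- admitted by Pre_; on a char the Python loop never consumes it would diverge, and on a dangling
-- trailing 'n'/'s' it raises IndexError (cs[i+1]? = none here) — both outside Pre_).
def find_tile_index_loop (cs : List Char) (fuel i : Nat) (x y : Int) : Int × Int :=
  match fuel with
  | 0 => (x, y)
  | Nat.succ f =>
    if i < cs.length then
      match cs[i]? with
      | none => (x, y)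
      | some d =>
        if d = 'n' ∨ d = 's' then
          match cs[i+1]? with
          | none => (x, y)   -- IndexError in Python; excluded by Pre_
          | some d2 =>
            let dir : String := String.ofList [d, d2]
            if dir = "ne" then find_tile_index_loop cs f (i+2) x (y-1)
            else if dir = "nw" then find_tile_index_loop cs f (i+2) (x-1) (y-1)
            else if dir = "sw" then find_tile_index_loop cs f (i+2) x (y+1)
            else if dir = "se" then find_tile_index_loop cs f (i+2) (x+1) (y+1)
            else find_tile_index_loop cs f (i+2) x y
        else if d = 'e' then find_tile_index_loop cs f (i+1) (x+1) y
        else if d = 'w' then find_tile_index_loop cs f (i+1) (x-1) y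
        else find_tile_index_loop cs f i x y   -- Python loops forever here; excluded by Pre_
    else (x, y)

def find_tile_index (line : String) : Int × Int :=
  find_tile_index_loop line.toList (line.toList.length + 1) 0 0 0

-- ===== PORT B =====
-- tokens(line): two chars after an 'n'/'s', one char otherwise; on a dangling trailing
-- 'n'/'s' the Python next(it) raises StopIteration (outside Pre_) — here the token is dropped.
def find_tile_index_tokens : List Char → List String
  | [] => []
  | c :: rest =>
    if c = 'n' ∨ c = 's' then
      match rest with
      | [] => []
      | d :: rest' => String.ofList [c, d] :: find_tile_index_tokens rest'
    else String.ofList [c] :: find_tile_index_tokens rest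

-- count each of the six token types, return a closed-form linear combination of the counts
def find_tile_index_alt (line : String) : Int × Int :=
  let ts := find_tile_index_tokens line.toList
  ((PySem.List.count ts "e" : Int) - (PySem.List.count ts "w" : Int)
     + (PySem.List.count ts "se" : Int) - (PySem.List.count ts "nw" : Int),
   (PySem.List.count ts "se" : Int) + (PySem.List.count ts "sw" : Int)
     - (PySem.List.count ts "ne" : Int) - (PySem.List.count ts "nw" : Int))

-- ===== PRECONDITION & SPEC =====
-- position t holds an 'n' or 's'
def pvIsNS (cs : List Char) (t : Nat) : Prop :=
  cs.getD t ' ' = 'n' ∨ cs.getD t ' ' = 's'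
-- the maximal block of consecutive 'n'/'s' characters ending just before position i has odd
-- length (⟺ position i is consumed as the second character of a two-char token)
def pvOddRun (cs : List Char) (i : Nat) : Prop :=
  ∃ k, k ≤ i ∧ k % 2 = 1 ∧ (∀ t, i - k ≤ t → t < i → pvIsNS cs t) ∧
    (i - k = 0 ∨ ¬ pvIsNS cs (i - k - 1))

-- Pre_ = exactly the inputs on which A returns: every character is one of n/s/e/w or is
-- swallowed as the second character of a two-char token (= preceded by an odd run of n/s),
-- and the line does not end with a dangling odd n/s run (there A raises IndexError; on an
-- unswallowed character outside n/s/e/w it loops forever).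
def Pre_find_tile_index (line : String) : Prop :=
  (∀ i, i < line.toList.length →
      (pvIsNS line.toList i ∨ line.toList.getD i ' ' = 'e' ∨ line.toList.getD i ' ' = 'w') ∨
        pvOddRun line.toList i) ∧
  ¬ pvOddRun line.toList line.toList.length
instance (line : String) : Decidable (Pre_find_tile_index line) := by
  unfold Pre_find_tile_index pvOddRun pvIsNS; infer_instance

def pvWitness_find_tile_index : String := "esew"

def Spec_find_tile_index (line : String) (out : Int × Int) : Prop := out = find_tile_index_alt line
instance (line : String) (out : Int × Int) : Decidable (Spec_find_tile_index line out) := by unfold Spec_find_tile_index; infer_instance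

-- ===== CLAIM (what is proved, stated in full; the proofs are below) =====
def Claim_equal_find_tile_index : Prop := ∀ (line : String), Dom_find_tile_index line → Pre_find_tile_index line → Spec_find_tile_index line (find_tile_index line)

-- ===== LEMMAS AND PROOFS =====

-- token-structural view of a valid line
inductive Wf : List Char → Prop
  | nil : Wf []
  | e (r) : Wf r → Wf ('e' :: r)
  | w (r) : Wf r → Wf ('w' :: r)
  | pair (a b r) : (a = 'n' ∨ a = 's') → Wf r → Wf (a :: b :: r)

-- Pre_, restated on a plain list of characters
def PreL (cs : List Char) : Prop :=
  (∀ i, i < cs.length →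
      (pvIsNS cs i ∨ cs.getD i ' ' = 'e' ∨ cs.getD i ' ' = 'w') ∨ pvOddRun cs i) ∧
  ¬ pvOddRun cs cs.length

theorem isNS_cons_succ (c : Char) (r : List Char) (t : Nat) :
    pvIsNS (c :: r) (t + 1) ↔ pvIsNS r t := by
  simp [pvIsNS]

theorem oddRun_zero (cs : List Char) : ¬ pvOddRun cs 0 := by
  rintro ⟨k, hk, hodd, -, -⟩; omega

theorem oddRun_shift1 (c : Char) (r : List Char) (i : Nat) (hc : ¬ pvIsNS (c :: r) 0) :
    pvOddRun (c :: r) (i + 1) ↔ pvOddRun r i := by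
  constructor
  · rintro ⟨k, hk, hodd, hall, hb⟩
    have hk1 : 1 ≤ k := by omega
    have hge : 1 ≤ i + 1 - k := by
      by_contra hlt
      exact hc (hall 0 (by omega) (by omega))
    refine ⟨k, by omega, hodd, ?_, ?_⟩
    · intro t h1 h2
      exact (isNS_cons_succ c r t).mp (hall (t + 1) (by omega) (by omega))
    · by_cases h0 : i - k = 0
      · exact Or.inl h0
      · refine Or.inr ?_
        have hb' : ¬ pvIsNS (c :: r) (i + 1 - k - 1) := by
          rcases hb with h | h
          · omega
          · exact h
        intro hns
        exact hb' (by
          have : i + 1 - k - 1 = (i - k - 1) + 1 := by omega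
          rw [this]
          exact (isNS_cons_succ c r _).mpr hns)
  · rintro ⟨k, hk, hodd, hall, hb⟩
    refine ⟨k, by omega, hodd, ?_, ?_⟩
    · intro t h1 h2
      have ht1 : 1 ≤ t := by omega
      have : t = (t - 1) + 1 := by omega
      rw [this]
      exact (isNS_cons_succ c r _).mpr (hall (t - 1) (by omega) (by omega))
    · refine Or.inr ?_
      by_cases h0 : i - k = 0
      · have : i + 1 - k - 1 = 0 := by omega
        rw [this]; exact hc
      · rcases hb with h0' | h
        · exact absurd h0' h0
        · have : i + 1 - k - 1 = (i - k - 1) + 1 := by omega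
          rw [this]
          intro hns
          exact h ((isNS_cons_succ c r _).mp hns)

theorem oddRun_shift2 (a b : Char) (r : List Char) (i : Nat) (ha : pvIsNS (a :: b :: r) 0) :
    pvOddRun (a :: b :: r) (i + 2) ↔ pvOddRun r i := by
  have hstep : ∀ t, pvIsNS (a :: b :: r) (t + 2) ↔ pvIsNS r t := by
    intro t
    simp [pvIsNS]
  constructor
  · rintro ⟨k, hk, hodd, hall, hb⟩
    by_cases hk2 : k ≤ i
    · -- run lies inside r (shifted by 2)
      have hge : 2 ≤ i + 2 - k := by omega
      refine ⟨k, hk2, hodd, ?_, ?_⟩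
      · intro t h1 h2
        exact (hstep t).mp (hall (t + 2) (by omega) (by omega))
      · by_cases h0 : i - k = 0
        · exact Or.inl h0
        · refine Or.inr ?_
          have hb' : ¬ pvIsNS (a :: b :: r) (i + 2 - k - 1) := by
            rcases hb with h | h
            · omega
            · exact h
          intro hns
          exact hb' (by
            have : i + 2 - k - 1 = (i - k - 1) + 2 := by omega
            rw [this]
            exact (hstep _).mpr hns)
    · -- the run reaches back into a, b
      have hk1 : k = i + 1 ∨ k = i + 2 := by omega
      rcases hk1 with h1 | h2
      · exfalso
        have : i + 2 - k = 1 := by omega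
        rcases hb with h | h
        · omega
        · rw [this] at h
          exact h ha
      · -- k = i + 2: both a and b are n/s, the r-run has length i
        subst h2
        have hodd' : i % 2 = 1 := by omega
        refine ⟨i, le_refl i, hodd', ?_, Or.inl (by omega)⟩
        intro t h1 h2
        exact (hstep t).mp (hall (t + 2) (by omega) (by omega))
  · rintro ⟨k, hk, hodd, hall, hb⟩
    rcases hb with h0 | h
    · -- the r-run starts at position 0 of r; extend through b (and a) if b is n/s
      by_cases hbns : pvIsNS (a :: b :: r) 1
      · refine ⟨k + 2, by omega, by omega, ?_, Or.inl (by omega)⟩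
        intro t h1 h2
        match t with
        | 0 => exact ha
        | 1 => exact hbns
        | Nat.succ (Nat.succ t') => exact (hstep t').mpr (hall t' (by omega) (by omega))
      · refine ⟨k, by omega, hodd, ?_, ?_⟩
        · intro t h1 h2
          have : t = (t - 2) + 2 := by omega
          rw [this]
          exact (hstep _).mpr (hall (t - 2) (by omega) (by omega))
        · refine Or.inr ?_
          have : i + 2 - k - 1 = 1 := by omega
          rw [this]; exact hbns
    · by_cases h0 : i - k = 0
      · exfalso
        have hi : 1 ≤ i := by omega
        have h00 : i - k - 1 = 0 := by omega
        have hr0 : pvIsNS r 0 := hall 0 (by omega) (by omega)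
        rw [h00] at h
        exact h hr0
      · refine ⟨k, by omega, hodd, ?_, ?_⟩
        · intro t h1 h2
          have : t = (t - 2) + 2 := by omega
          rw [this]
          exact (hstep _).mpr (hall (t - 2) (by omega) (by omega))
        · refine Or.inr ?_
          have : i + 2 - k - 1 = (i - k - 1) + 2 := by omega
          rw [this]
          intro hns
          exact h ((hstep _).mp hns)

theorem preL_shift1 (c : Char) (r : List Char) (hc : ¬ pvIsNS (c :: r) 0)
    (h : PreL (c :: r)) : PreL r := by
  refine ⟨?_, ?_⟩
  · intro i hi
    rcases h.1 (i + 1) (by simpa using Nat.succ_lt_succ hi) with h' | h'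
    · left
      rcases h' with h'' | h'' | h'' <;>
        [exact Or.inl ((isNS_cons_succ c r i).mp h''); exact Or.inr (Or.inl (by simpa using h''));
         exact Or.inr (Or.inr (by simpa using h''))]
    · exact Or.inr ((oddRun_shift1 c r i hc).mp h')
  · intro hodd
    exact h.2 (by
      have : (c :: r).length = r.length + 1 := by simp
      rw [this]
      exact (oddRun_shift1 c r r.length hc).mpr hodd)

theorem preL_shift2 (a b : Char) (r : List Char) (ha : pvIsNS (a :: b :: r) 0)
    (h : PreL (a :: b :: r)) : PreL r := by
  refine ⟨?_, ?_⟩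
  · intro i hi
    rcases h.1 (i + 2) (by simp; omega) with h' | h'
    · left
      rcases h' with h'' | h'' | h'' <;>
        [skip; exact Or.inr (Or.inl (by simpa using h''));
         exact Or.inr (Or.inr (by simpa using h''))]
      left
      have : pvIsNS (a :: b :: r) (i + 2) ↔ pvIsNS r i := by simp [pvIsNS]
      exact this.mp h''
    · exact Or.inr ((oddRun_shift2 a b r i ha).mp h')
  · intro hodd
    exact h.2 (by
      have : (a :: b :: r).length = r.length + 2 := by simp
      rw [this]
      exact (oddRun_shift2 a b r r.length ha).mpr hodd)

theorem closed_wf : ∀ (cs : List Char), PreL cs → Wf cs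
  | [], _ => Wf.nil
  | (c :: rest), h => by
      have h0 := h.1 0 (by simp)
      rcases h0 with h0 | h0
      swap
      · exact absurd h0 (oddRun_zero _)
      rcases h0 with hns | he | hw
      · -- c is 'n' or 's': the next char must exist (else a dangling odd run), and is swallowed
        cases rest with
        | nil =>
          exfalso
          apply h.2
          simp only [List.length_singleton]
          refine ⟨1, le_refl 1, by decide, ?_, Or.inl (by omega)⟩
          intro t h1 h2
          have : t = 0 := by omega
          subst this
          exact hns
        | cons b rest' =>
          refine Wf.pair c b rest' (by simpa [pvIsNS] using hns)
            (closed_wf rest' (preL_shift2 c b rest' hns h))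
      · have hc : ¬ pvIsNS (c :: rest) 0 := by
          simp [pvIsNS] at he ⊢
          subst he; decide
        simp at he
        subst he
        exact Wf.e rest (closed_wf rest (preL_shift1 _ rest hc h))
      · have hc : ¬ pvIsNS (c :: rest) 0 := by
          simp [pvIsNS] at hw ⊢
          subst hw; decide
        simp at hw
        subst hw
        exact Wf.w rest (closed_wf rest (preL_shift1 _ rest hc h))
termination_by cs => cs.length


-- the loop only looks at the suffix from i on
theorem loop_shift (fuel : Nat) : ∀ (cs : List Char) (i : Nat) (x y : Int),
    find_tile_index_loop cs fuel i x y = find_tile_index_loop (cs.drop i) fuel 0 x y := by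
  induction fuel with
  | zero => intro cs i x y; rfl
  | succ f ih =>
    intro cs i x y
    by_cases hi : i < cs.length
    · have hdrop : 0 < (cs.drop i).length := by simp [List.length_drop]; omega
      have hget0 : (cs.drop i)[0]? = cs[i]? := by simp [List.getElem?_drop]
      have hget1 : (cs.drop i)[1]? = cs[i+1]? := by simp [List.getElem?_drop]
      obtain ⟨d, hd⟩ : ∃ d, cs[i]? = some d := ⟨cs[i], List.getElem?_eq_getElem hi⟩
      simp only [find_tile_index_loop, hi, hdrop, if_true, hget0, hget1, hd]
      cases hcs1 : cs[i+1]? with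
      | none =>
        simp only [hcs1]
        split_ifs <;>
          first
          | (rw [ih]; done)
          | rfl
          | ((rw [ih]); try (conv_rhs => rw [ih]); try rw [List.drop_drop])
      | some d2 =>
        simp only [hcs1]
        split_ifs <;>
          first
          | (rw [ih]; done)
          | rfl
          | ((rw [ih]); try (conv_rhs => rw [ih]); try rw [List.drop_drop])
    · have hdrop : ¬ 0 < (cs.drop i).length := by simp [List.length_drop]; omega
      simp [find_tile_index_loop, hi]

-- one loop iteration on each kind of token start
theorem loop_cons_e (r : List Char) (f : Nat) (x y : Int) :
    find_tile_index_loop ('e' :: r) (Nat.succ f) 0 x y = find_tile_index_loop r f 0 (x+1) y := by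
  have h1 : find_tile_index_loop ('e' :: r) (Nat.succ f) 0 x y
      = find_tile_index_loop ('e' :: r) f (0+1) (x+1) y := by
    simp [find_tile_index_loop]
  rw [h1, loop_shift f ('e' :: r) (0+1)]; simp

theorem loop_cons_w (r : List Char) (f : Nat) (x y : Int) :
    find_tile_index_loop ('w' :: r) (Nat.succ f) 0 x y = find_tile_index_loop r f 0 (x-1) y := by
  have h1 : find_tile_index_loop ('w' :: r) (Nat.succ f) 0 x y
      = find_tile_index_loop ('w' :: r) f (0+1) (x-1) y := by
    simp [find_tile_index_loop]
  rw [h1, loop_shift f ('w' :: r) (0+1)]; simp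

-- the offset A's branches add for a token (proof-side characterisation, not used by either port)
def pOff (t : String) : Int × Int :=
  if t = "ne" then (0, -1) else if t = "nw" then (-1, -1) else if t = "sw" then (0, 1)
  else if t = "se" then (1, 1) else if t = "e" then (1, 0) else if t = "w" then (-1, 0)
  else (0, 0)

theorem pOff_pair_default (a b : Char)
    (h1 : ¬ String.ofList [a, b] = "ne") (h2 : ¬ String.ofList [a, b] = "nw")
    (h3 : ¬ String.ofList [a, b] = "sw") (h4 : ¬ String.ofList [a, b] = "se") :
    pOff (String.ofList [a, b]) = (0, 0) := by
  have he : ¬ String.ofList [a, b] = "e" := by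
    intro h; have := congrArg String.toList h; simp at this
  have hw : ¬ String.ofList [a, b] = "w" := by
    intro h; have := congrArg String.toList h; simp at this
  simp [pOff, h1, h2, h3, h4, he, hw]

theorem loop_cons_pair (a b : Char) (r : List Char) (f : Nat) (x y : Int)
    (ha : a = 'n' ∨ a = 's') :
    find_tile_index_loop (a :: b :: r) (Nat.succ f) 0 x y =
      find_tile_index_loop r f 0 (x + (pOff (String.ofList [a, b])).1)
        (y + (pOff (String.ofList [a, b])).2) := by
  have hstep : ∀ (x' y' : Int), find_tile_index_loop (a :: b :: r) f (0+2) x' y'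
      = find_tile_index_loop r f 0 x' y' := by
    intro x' y'; rw [loop_shift f (a :: b :: r) (0+2)]; simp
  have hunf : find_tile_index_loop (a :: b :: r) (Nat.succ f) 0 x y =
      (if String.ofList [a, b] = "ne" then find_tile_index_loop (a :: b :: r) f (0+2) x (y-1)
       else if String.ofList [a, b] = "nw" then find_tile_index_loop (a :: b :: r) f (0+2) (x-1) (y-1)
       else if String.ofList [a, b] = "sw" then find_tile_index_loop (a :: b :: r) f (0+2) x (y+1)
       else if String.ofList [a, b] = "se" then find_tile_index_loop (a :: b :: r) f (0+2) (x+1) (y+1)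
       else find_tile_index_loop (a :: b :: r) f (0+2) x y) := by
    simp only [find_tile_index_loop, List.length_cons, List.getElem?_cons_zero,
      List.getElem?_cons_succ]
    rw [if_pos (by omega : (0:Nat) < r.length + 1 + 1), if_pos ha]
  rw [hunf]
  by_cases h1 : String.ofList [a, b] = "ne"
  · rw [if_pos h1, hstep, h1, show pOff "ne" = (0, -1) from by decide]
    norm_num [sub_eq_add_neg]
  rw [if_neg h1]
  by_cases h2 : String.ofList [a, b] = "nw"
  · rw [if_pos h2, hstep, h2, show pOff "nw" = (-1, -1) from by decide]
    norm_num [sub_eq_add_neg]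
  rw [if_neg h2]
  by_cases h3 : String.ofList [a, b] = "sw"
  · rw [if_pos h3, hstep, h3, show pOff "sw" = (0, 1) from by decide]
    norm_num
  rw [if_neg h3]
  by_cases h4 : String.ofList [a, b] = "se"
  · rw [if_pos h4, hstep, h4, show pOff "se" = (1, 1) from by decide]
  rw [if_neg h4, hstep, pOff_pair_default a b h1 h2 h3 h4]
  norm_num

-- token sums (what A accumulates, restated per token)
def sumX : List String → Int
  | [] => 0
  | t :: ts => (pOff t).1 + sumX ts
def sumY : List String → Int
  | [] => 0
  | t :: ts => (pOff t).2 + sumY ts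

theorem tokens_e (r : List Char) :
    find_tile_index_tokens ('e' :: r) = String.ofList ['e'] :: find_tile_index_tokens r := by
  conv_lhs => rw [find_tile_index_tokens.eq_def]
  simp

theorem tokens_w (r : List Char) :
    find_tile_index_tokens ('w' :: r) = String.ofList ['w'] :: find_tile_index_tokens r := by
  conv_lhs => rw [find_tile_index_tokens.eq_def]
  simp

theorem tokens_pair (a b : Char) (r : List Char) (ha : a = 'n' ∨ a = 's') :
    find_tile_index_tokens (a :: b :: r) =
      String.ofList [a, b] :: find_tile_index_tokens r := by
  conv_lhs => rw [find_tile_index_tokens.eq_def]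
  rcases ha with h|h <;> subst h <;> simp

theorem loop_wf (cs : List Char) (h : Wf cs) :
    ∀ (fuel : Nat), cs.length + 1 ≤ fuel → ∀ (x y : Int),
    find_tile_index_loop cs fuel 0 x y =
      (x + sumX (find_tile_index_tokens cs), y + sumY (find_tile_index_tokens cs)) := by
  induction h with
  | nil =>
    intro fuel hf x y
    match fuel, hf with
    | Nat.succ f, _ => simp [find_tile_index_loop, find_tile_index_tokens, sumX, sumY]
  | e r hr ih =>
    intro fuel hf x y
    match fuel, hf with
    | Nat.succ f, hf =>
      rw [loop_cons_e, ih f (by simp only [List.length_cons] at hf; omega), tokens_e]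
      simp only [sumX, sumY, Prod.mk.injEq]
      constructor
      · rw [show (pOff (String.ofList ['e'])).1 = 1 from by decide]; ring
      · rw [show (pOff (String.ofList ['e'])).2 = 0 from by decide]; ring
  | w r hr ih =>
    intro fuel hf x y
    match fuel, hf with
    | Nat.succ f, hf =>
      rw [loop_cons_w, ih f (by simp only [List.length_cons] at hf; omega), tokens_w]
      simp only [sumX, sumY, Prod.mk.injEq]
      constructor
      · rw [show (pOff (String.ofList ['w'])).1 = -1 from by decide]; ring
      · rw [show (pOff (String.ofList ['w'])).2 = 0 from by decide]; ring
  | pair a b r ha hr ih =>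
    intro fuel hf x y
    match fuel, hf with
    | Nat.succ f, hf =>
      rw [loop_cons_pair a b r f x y ha,
          ih f (by simp only [List.length_cons] at hf; omega), tokens_pair a b r ha]
      simp only [sumX, sumY, Prod.mk.injEq]
      constructor <;> ring

-- a cons step of PySem.List.count, cast to Int
theorem count_cons_int (t v : String) (ts : List String) :
    (PySem.List.count (t :: ts) v : Int) =
      (if t = v then 1 else 0) + (PySem.List.count ts v : Int) := by
  simp only [PySem.List.count_eq, List.count_cons]
  by_cases h : t = v
  · simp [h]; ring
  · simp [h]

-- the per-token sums equal the closed-form combination of the six counts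
theorem sumX_count (ts : List String) :
    sumX ts = (PySem.List.count ts "e" : Int) - (PySem.List.count ts "w" : Int)
      + (PySem.List.count ts "se" : Int) - (PySem.List.count ts "nw" : Int) := by
  induction ts with
  | nil => simp [sumX, PySem.List.count_eq]
  | cons t ts ih =>
    simp only [sumX, ih, count_cons_int]
    unfold pOff
    split_ifs <;> simp_all <;> ring

theorem sumY_count (ts : List String) :
    sumY ts = (PySem.List.count ts "se" : Int) + (PySem.List.count ts "sw" : Int)
      - (PySem.List.count ts "ne" : Int) - (PySem.List.count ts "nw" : Int) := by
  induction ts with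
  | nil => simp [sumY, PySem.List.count_eq]
  | cons t ts ih =>
    simp only [sumY, ih, count_cons_int]
    unfold pOff
    split_ifs <;> simp_all <;> ring

-- ===== VERDICT (by name: the statement is the Claim_ definition above) =====
theorem find_tile_index_spec : Claim_equal_find_tile_index := by
  intro line _ hpre
  unfold Spec_find_tile_index find_tile_index find_tile_index_alt
  have hwf : Wf line.toList := closed_wf _ ⟨hpre.1, hpre.2⟩
  rw [loop_wf _ hwf _ (le_refl _), sumX_count, sumY_count]
  simp
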